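-- pv_equiv track=rewrite | github.com/Stardusted1/ORO | func/functions.py | GetMaxMin_Y_X
-- ===== SOURCE A (Python) =====
-- def GetMaxMin_Y_X(obj) -> list:
--     maxX = obj[0][1]
--     minX = obj[0][1]
--     maxY = max(obj)[0]
--     minY = min(obj)[0]
--     for x in obj:
--         if x[1] >= maxX:
--             maxX = x[1]
--         if x[1] <= minX:
--             minX = x[1]
--     return [[maxY, maxX], [minY, minX]]
-- ===== SOURCE B (Python) =====
-- def GetMaxMin_Y_X(obj) -> list:
--     rows = sorted(obj)
--     xs = sorted(x[1] for x in obj)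
--     return [[rows[-1][0], xs[-1]], [rows[0][0], xs[0]]]
-- ===== Notes on version B (the rewrite author's own statement) =====
-- stated objective: alternative
-- what changed: A scans for extremes (builtin max(obj)/min(obj) plus an explicit running-max/min loop over the X column); B sorts the rows and the X column once and reads the answers off the ends of the sorted lists.
import Mathlib
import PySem

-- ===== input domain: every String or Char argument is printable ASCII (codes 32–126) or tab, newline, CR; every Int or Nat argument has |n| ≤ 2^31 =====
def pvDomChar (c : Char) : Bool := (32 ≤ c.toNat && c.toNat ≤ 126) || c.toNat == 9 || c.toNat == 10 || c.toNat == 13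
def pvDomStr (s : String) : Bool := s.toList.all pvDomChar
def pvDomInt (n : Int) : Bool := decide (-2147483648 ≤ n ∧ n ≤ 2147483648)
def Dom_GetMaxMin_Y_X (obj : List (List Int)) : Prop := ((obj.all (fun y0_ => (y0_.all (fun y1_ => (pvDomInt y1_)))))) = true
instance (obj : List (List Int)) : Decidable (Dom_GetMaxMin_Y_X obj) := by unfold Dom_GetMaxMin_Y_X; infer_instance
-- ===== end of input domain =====

-- B replaces A's extreme-scanning (builtin max(obj)/min(obj) plus a running-max/min loop over
-- the X column) by sorting the rows and the X column and reading the answers off the ends.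


-- ===== PORT A =====
-- loop body of A's explicit for-loop over (maxX, minX)
def pvStepA (p : Int × Int) (x : List Int) : Int × Int :=
  let v := PySem.List.pyGetD x 1 0
  (if v ≥ p.1 then v else p.1, if v ≤ p.2 then v else p.2)

def GetMaxMin_Y_X (obj : List (List Int)) : List (List Int) :=
  let maxX0 := PySem.List.pyGetD (PySem.List.pyGetD obj 0 []) 1 0
  let minX0 := PySem.List.pyGetD (PySem.List.pyGetD obj 0 []) 1 0
  let maxY := PySem.List.pyGetD ((PySem.List.max? obj (fun x => x)).getD []) 0 0
  let minY := PySem.List.pyGetD ((PySem.List.min? obj (fun x => x)).getD []) 0 0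
  let p := obj.foldl pvStepA (maxX0, minX0)
  [[maxY, p.1], [minY, p.2]]

-- ===== PORT B =====
def GetMaxMin_Y_X_alt (obj : List (List Int)) : List (List Int) :=
  let rows := PySem.List.sorted obj (fun x => x) false
  let xs := PySem.List.sorted (obj.map (fun x => PySem.List.pyGetD x 1 0)) (fun v => v) false
  [[PySem.List.pyGetD (PySem.List.pyGetD rows (-1) []) 0 0, PySem.List.pyGetD xs (-1) 0],
   [PySem.List.pyGetD (PySem.List.pyGetD rows 0 []) 0 0, PySem.List.pyGetD xs 0 0]]

-- ===== PRECONDITION & SPEC =====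
-- Pre_ excludes exactly the inputs where the Python A raises IndexError:
-- the empty list (obj[0]) and lists containing a row of length < 2 (x[1] in the loop / obj[0][1]).
def Pre_GetMaxMin_Y_X (obj : List (List Int)) : Prop :=
  obj ≠ [] ∧ ∀ x ∈ obj, 2 ≤ x.length
instance (obj : List (List Int)) : Decidable (Pre_GetMaxMin_Y_X obj) := by unfold Pre_GetMaxMin_Y_X; infer_instance

def pvWitness_GetMaxMin_Y_X : List (List Int) := [[3, 7], [1, 9, 2], [3, 0]]

def Spec_GetMaxMin_Y_X (obj : List (List Int)) (out : List (List Int)) : Prop := out = GetMaxMin_Y_X_alt obj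
instance (obj : List (List Int)) (out : List (List Int)) : Decidable (Spec_GetMaxMin_Y_X obj out) := by unfold Spec_GetMaxMin_Y_X; infer_instance

-- ===== CLAIM (what is proved, stated in full; the proofs are below) =====
def Claim_equal_GetMaxMin_Y_X : Prop := ∀ (obj : List (List Int)), Dom_GetMaxMin_Y_X obj → Pre_GetMaxMin_Y_X obj → Spec_GetMaxMin_Y_X obj (GetMaxMin_Y_X obj)

-- ===== LEMMAS AND PROOFS =====

-- in an ascending chain every element is ≤ the last one
theorem le_getLast_of_pairwise {α : Type} [LinearOrder α] {l : List α}
    (hp : l.Pairwise (· ≤ ·)) (h : l ≠ []) : ∀ y ∈ l, y ≤ l.getLast h := by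
  induction l with
  | nil => simp at h
  | cons a t ih =>
      rcases List.pairwise_cons.1 hp with ⟨ha, hpt⟩
      intro y hy
      cases t with
      | nil => simp at hy; simp [hy]
      | cons b s =>
          rw [List.getLast_cons (by simp)]
          rcases hy with _ | hy'
          · exact le_trans (ha _ (List.getLast_mem _)) le_rfl
          · exact ih hpt (by simp) y (by assumption)

-- first element of sorted(x::t) is the running min
theorem head_sorted_eq_foldl_min {α : Type} [LinearOrder α] (x : α) (t : List α) (d : α) :
    PySem.List.pyGetD (PySem.List.sorted (x :: t) (fun y => y) false) 0 d = t.foldl min x := by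
  have hne : PySem.List.sorted (x :: t) (fun y => y) false ≠ [] := by
    simp [PySem.List.sorted_eq_nil_iff]
  obtain ⟨m, s, hs⟩ := List.exists_cons_of_ne_nil hne
  have hmin := @PySem.List.min?_id_cons α _ x t
  have hmem : t.foldl min x ∈ x :: t := PySem.List.min?_mem hmin
  have hismin := PySem.List.min?_isMin hmin
  have hm_mem : m ∈ x :: t := by
    have := (PySem.List.sorted_perm (x :: t) (fun y => y) false).mem_iff (a := m)
    rw [hs] at this; exact this.1 (by simp)
  have h1 : m ≤ t.foldl min x := PySem.List.key_head_sorted_le (x :: t) (fun y => y) hs _ hmem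
  have h2 : t.foldl min x ≤ m := hismin m hm_mem
  rw [hs, PySem.List.pyGetD_zero_cons]
  exact le_antisymm h1 h2

-- last element of sorted(x::t) is the running max
theorem last_sorted_eq_foldl_max {α : Type} [LinearOrder α] (x : α) (t : List α) (d : α) :
    PySem.List.pyGetD (PySem.List.sorted (x :: t) (fun y => y) false) (-1) d = t.foldl max x := by
  have hne : PySem.List.sorted (x :: t) (fun y => y) false ≠ [] := by
    simp [PySem.List.sorted_eq_nil_iff]
  have hmax := @PySem.List.max?_id_cons α _ x t
  have hmem : t.foldl max x ∈ x :: t := PySem.List.max?_mem hmax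
  have hismax := PySem.List.max?_isMax hmax
  have hlast_mem : (PySem.List.sorted (x :: t) (fun y => y) false).getLast hne ∈ x :: t := by
    have := (PySem.List.sorted_perm (x :: t) (fun y => y) false).mem_iff
      (a := (PySem.List.sorted (x :: t) (fun y => y) false).getLast hne)
    exact this.1 (List.getLast_mem hne)
  have hpw := PySem.List.sorted_pairwise (x :: t) (fun y => y)
  have hfold_mem_sorted : t.foldl max x ∈ PySem.List.sorted (x :: t) (fun y => y) false := by
    have := (PySem.List.sorted_perm (x :: t) (fun y => y) false).mem_iff (a := t.foldl max x)
    exact this.2 hmem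
  have h1 : t.foldl max x ≤ (PySem.List.sorted (x :: t) (fun y => y) false).getLast hne :=
    le_getLast_of_pairwise hpw hne _ hfold_mem_sorted
  have h2 : (PySem.List.sorted (x :: t) (fun y => y) false).getLast hne ≤ t.foldl max x :=
    hismax _ hlast_mem
  rw [PySem.List.pyGetD_neg_one _ d hne]
  exact le_antisymm h2 h1

-- A's scalar loop is the pair of running max / min folds over the X column
theorem foldA_eq (l : List (List Int)) (a b : Int) :
    l.foldl pvStepA (a, b) =
      ((l.map (fun x => PySem.List.pyGetD x 1 0)).foldl max a,
       (l.map (fun x => PySem.List.pyGetD x 1 0)).foldl min b) := by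
  induction l generalizing a b with
  | nil => rfl
  | cons x t ih =>
      have hmx : (if PySem.List.pyGetD x 1 0 ≥ a then PySem.List.pyGetD x 1 0 else a)
          = max a (PySem.List.pyGetD x 1 0) := by
        by_cases h : PySem.List.pyGetD x 1 0 ≥ a
        · simp [h]
        · simp [h, max_eq_left (le_of_not_ge h)]
      have hmn : (if PySem.List.pyGetD x 1 0 ≤ b then PySem.List.pyGetD x 1 0 else b)
          = min b (PySem.List.pyGetD x 1 0) := by
        by_cases h : PySem.List.pyGetD x 1 0 ≤ b
        · simp [h]
        · simp [h, min_eq_left ((not_le.1 h).le)]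
      simp only [List.foldl_cons, List.map_cons, pvStepA]
      rw [hmx, hmn, ih]

-- PySem.List.max?_id_cons / min?_id_cons transported to the ambient DecidableLT on List Int
theorem my_max_cons (x : List Int) (t : List (List Int)) :
    PySem.List.max? (x::t) (fun y => y) = some (t.foldl max x) := by
  have h := @PySem.List.max?_id_cons (List Int) inferInstance x t
  convert h using 2

theorem my_min_cons (x : List Int) (t : List (List Int)) :
    PySem.List.min? (x::t) (fun y => y) = some (t.foldl min x) := by
  have h := @PySem.List.min?_id_cons (List Int) inferInstance x t
  convert h using 2

-- ===== VERDICT (by name: the statement is the Claim_ definition above) =====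
theorem GetMaxMin_Y_X_spec : Claim_equal_GetMaxMin_Y_X := by
  intro obj _ hpre
  obtain ⟨hne, -⟩ := hpre
  obtain ⟨h, t, rfl⟩ := List.exists_cons_of_ne_nil hne
  simp only [Spec_GetMaxMin_Y_X, GetMaxMin_Y_X, GetMaxMin_Y_X_alt, List.map_cons]
  rw [foldA_eq, my_max_cons, my_min_cons]
  have e1 : PySem.List.pyGetD (PySem.List.sorted (h :: t) (fun x => x) false) 0 []
      = t.foldl min h := by
    have e := head_sorted_eq_foldl_min (α := List Int) h t []
    convert e using 3
  have e2 : PySem.List.pyGetD (PySem.List.sorted (h :: t) (fun x => x) false) (-1) []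
      = t.foldl max h := by
    have e := last_sorted_eq_foldl_max (α := List Int) h t []
    convert e using 3
  rw [e1, e2]
  rw [head_sorted_eq_foldl_min (α := Int) (PySem.List.pyGetD h 1 0)
        (t.map (fun x => PySem.List.pyGetD x 1 0)) 0]
  rw [last_sorted_eq_foldl_max (α := Int) (PySem.List.pyGetD h 1 0)
        (t.map (fun x => PySem.List.pyGetD x 1 0)) 0]
  simp [PySem.List.pyGetD_zero_cons, List.foldl_cons, max_self, min_self]
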